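-- pv_equiv track=rewrite | github.com/RockPalmer/Python | Assignment 9/Assignment9.py | findsumlarglast
-- ===== SOURCE A (Python) =====
-- def findsumlarglast(alist):
--     mysum = 0
--     if alist[0] > alist[len(alist) - 1]:
--         mysum = mysum + alist[0]
--     if len(alist) > 2:
--         newlist = alist[1:]
--         mysum = mysum + findsumlarglast(newlist)
--     return mysum
-- ===== SOURCE B (Python) =====
-- def findsumlarglast(alist):
--     last = alist[-1]
--     mysum = 0
--     for x in alist:
--         if x > last:
--             mysum += x
--     return mysum
-- ===== Notes on version B (the rewrite author's own statement) =====
-- stated objective: faster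
-- what changed: Replaces A's recursion over tail slices (which re-reads the shared last element at every level) with a single flat accumulator loop over the whole list after binding the last element once; the last element never exceeds itself, so the full scan is exact.
import Mathlib
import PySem

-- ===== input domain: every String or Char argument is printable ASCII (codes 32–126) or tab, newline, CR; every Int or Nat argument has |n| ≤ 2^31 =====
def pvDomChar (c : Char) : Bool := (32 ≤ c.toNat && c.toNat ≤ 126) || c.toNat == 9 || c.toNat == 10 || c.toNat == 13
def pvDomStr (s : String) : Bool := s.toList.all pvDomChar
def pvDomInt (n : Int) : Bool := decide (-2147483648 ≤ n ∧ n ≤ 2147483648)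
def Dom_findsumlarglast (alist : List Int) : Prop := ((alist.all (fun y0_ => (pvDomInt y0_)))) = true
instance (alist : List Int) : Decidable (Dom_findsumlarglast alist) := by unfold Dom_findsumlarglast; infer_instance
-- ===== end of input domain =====

-- B replaces A's recursion over tail slices with one flat accumulator loop after binding the last element once (objective: simpler).

-- ===== PORT A =====
-- A's recursion on alist[1:] is structural: for a :: rest the slice alist[1:] is rest.
def findsumlarglast : List Int → Int
  | [] => 0   -- alist[0] raises IndexError in Python; excluded by Pre_
  | a :: rest =>
    let mysum : Int := 0
    -- alist[0] > alist[len(alist) - 1]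
    let mysum := if a > PySem.List.pyGetD (a :: rest) (((a :: rest).length : Int) - 1) 0
                 then mysum + a else mysum
    if ((a :: rest).length : Int) > 2 then mysum + findsumlarglast rest else mysum

-- ===== PORT B =====
def findsumlarglast_alt (alist : List Int) : Int :=
  let last := PySem.List.pyGetD alist (-1) 0   -- alist[-1]; IndexError on [] is excluded by Pre_
  alist.foldl (fun mysum x => if x > last then mysum + x else mysum) 0

-- ===== PRECONDITION & SPEC =====
-- Both A (alist[0]) and B (alist[-1]) raise IndexError on the empty list.
def Pre_findsumlarglast (alist : List Int) : Prop := alist ≠ []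
instance (alist : List Int) : Decidable (Pre_findsumlarglast alist) := by unfold Pre_findsumlarglast; infer_instance
def pvWitness_findsumlarglast : List Int := [3, 1, 2]

def Spec_findsumlarglast (alist : List Int) (out : Int) : Prop := out = findsumlarglast_alt alist
instance (alist : List Int) (out : Int) : Decidable (Spec_findsumlarglast alist out) := by unfold Spec_findsumlarglast; infer_instance

-- ===== CLAIM (what is proved, stated in full; the proofs are below) =====
def Claim_equal_findsumlarglast : Prop := ∀ (alist : List Int), Dom_findsumlarglast alist → Pre_findsumlarglast alist → Spec_findsumlarglast alist (findsumlarglast alist)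

-- ===== LEMMAS AND PROOFS =====

-- the last element of a nonempty list, as both ports read it
lemma pyGetD_last_eq (l : List Int) (h : l ≠ []) :
    PySem.List.pyGetD l ((l.length : Int) - 1) 0 = l.getLast h := by
  have h1 : (1 : Int) ≤ l.length := by
    have := List.length_pos_iff.mpr h; omega
  have : ((l.length : Int) - 1) = ((l.length - 1 : Nat) : Int) := by omega
  rw [this, PySem.List.pyGetD_natCast]
  rw [List.getLast_eq_getElem]
  exact List.getD_eq_getElem l 0 (by have := List.length_pos_iff.mpr h; omega)

-- one-step unfolding of A's recursion, in sum form
lemma A_unfold (a : Int) (rest : List Int) :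
    findsumlarglast (a :: rest) =
      (if a > PySem.List.pyGetD (a :: rest) (((a :: rest).length : Int) - 1) 0 then a else 0) +
      (if ((a :: rest).length : Int) > 2 then findsumlarglast rest else 0) := by
  conv_lhs => rw [findsumlarglast]
  split_ifs <;> ring

-- A's recursion computes the sum of the elements strictly greater than the shared last element
lemma A_char : ∀ (rest : List Int) (a L : Int), (a :: rest).getLast (by simp) = L →
    findsumlarglast (a :: rest) = ((a :: rest).filter (fun x => decide (x > L))).sum := by
  intro rest
  induction rest with
  | nil =>
      intro a L hL
      simp at hL
      subst hL
      rw [A_unfold, pyGetD_last_eq [a] (by simp)]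
      simp
  | cons b t ih =>
      intro a L hL
      have hlast : (b :: t).getLast (by simp) = L := by
        rw [← hL]; exact (List.getLast_cons (by simp)).symm
      have hget : PySem.List.pyGetD (a :: b :: t) (((a :: b :: t).length : Int) - 1) 0 = L := by
        rw [pyGetD_last_eq (a :: b :: t) (by simp)]
        rw [List.getLast_cons (by simp)]; exact hlast
      rw [A_unfold, hget]
      cases t with
      | nil =>
          simp at hlast
          subst hlast
          by_cases hcmp : a > b <;> simp [hcmp, List.filter]
      | cons c u =>
          have hrec := ih b L hlast
          have hlen : (((a :: b :: c :: u).length : Int) > 2) := by simp; omega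
          rw [if_pos hlen, hrec]
          by_cases hcmp : a > L <;> simp [hcmp, List.filter_cons]

-- B's flat loop computes the same sum
lemma foldl_if_sum (L : Int) : ∀ (l : List Int) (s : Int),
    l.foldl (fun mysum x => if x > L then mysum + x else mysum) s
      = s + ((l.filter (fun x => decide (x > L))).sum) := by
  intro l
  induction l with
  | nil => simp
  | cons a t ih =>
      intro s
      simp only [List.foldl_cons, List.filter]
      by_cases hcmp : a > L <;> simp [hcmp, ih] <;> ring

lemma B_char (l : List Int) (h : l ≠ []) :
    findsumlarglast_alt l = ((l.filter (fun x => decide (x > l.getLast h))).sum) := by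
  unfold findsumlarglast_alt
  rw [PySem.List.pyGetD_neg_one l 0 h, foldl_if_sum]
  ring

-- ===== VERDICT (by name: the statement is the Claim_ definition above) =====
theorem findsumlarglast_spec : Claim_equal_findsumlarglast := by
  intro alist _ hpre
  unfold Spec_findsumlarglast
  cases alist with
  | nil => exact absurd rfl hpre
  | cons a rest =>
      rw [B_char (a :: rest) (by simp)]
      exact A_char rest a _ rfl
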